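-- pv_equiv track=rewrite | github.com/robbyczgw-cla/grip-ai | grip/tools/shell.py | _extract_rm_targets
-- ===== SOURCE A (Python) =====
-- def _extract_rm_targets(tokens: list[str]) -> list[str]:
--     """Extract non-flag arguments (file/dir targets) from rm tokens."""
--     targets: list[str] = []
--     past_flags = False
--     for token in tokens[1:]:
--         if token == "--":
--             past_flags = True
--             continue
--         if past_flags or not token.startswith("-"):
--             targets.append(token)
--     return targets
-- ===== SOURCE B (Python) =====
-- def _extract_rm_targets(tokens: list[str]) -> list[str]:
--     """Extract non-flag arguments (file/dir targets) from rm tokens."""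
--     rest = tokens[1:]
--     if "--" in rest:
--         i = rest.index("--")
--         return ([t for t in rest[:i] if not t.startswith("-")]
--                 + [t for t in rest[i + 1:] if t != "--"])
--     return [t for t in rest if not t.startswith("-")]
-- ===== Notes on version B (the rewrite author's own statement) =====
-- stated objective: simpler
-- what changed: Replaced A's single stateful scan with a past_flags toggle by locating the first '--' delimiter once and returning the flag-filtered pre-delimiter slice concatenated with the post-delimiter slice (with any further '--' tokens dropped, as A drops every '--').
import Mathlib
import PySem

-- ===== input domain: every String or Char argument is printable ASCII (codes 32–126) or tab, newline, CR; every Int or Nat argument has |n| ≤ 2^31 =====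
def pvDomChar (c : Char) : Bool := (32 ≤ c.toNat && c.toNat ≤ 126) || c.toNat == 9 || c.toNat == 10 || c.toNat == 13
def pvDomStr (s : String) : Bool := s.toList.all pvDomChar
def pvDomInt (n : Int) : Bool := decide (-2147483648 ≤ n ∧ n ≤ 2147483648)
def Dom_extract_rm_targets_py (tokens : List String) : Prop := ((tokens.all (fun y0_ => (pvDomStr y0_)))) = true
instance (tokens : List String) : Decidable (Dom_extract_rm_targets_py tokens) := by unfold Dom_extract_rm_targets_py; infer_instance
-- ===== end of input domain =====

-- B locates the first "--" delimiter once and returns the filtered pre-delimiter slice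
-- plus the post-delimiter slice (with further "--" dropped), replacing A's stateful scan;
-- objective: simpler decomposition, same cost.

-- ===== PORT A =====
-- A's loop body: the state is (targets, past_flags)
def pvStepA (s : List String × Bool) (token : String) : List String × Bool :=
  if token = "--" then (s.1, true)
  else if s.2 || !(PySem.Str.startswith token "-") then (s.1 ++ [token], s.2)
  else s

def extract_rm_targets_py (tokens : List String) : List String :=
  ((PySem.List.slice tokens (some 1) none).foldl pvStepA ([], false)).1

-- ===== PORT B =====
def extract_rm_targets_py_alt (tokens : List String) : List String :=
  let rest := PySem.List.slice tokens (some 1) none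
  match PySem.List.index? rest "--" with
  | some i =>
      (PySem.List.slice rest none (some (i : Int))).filter
        (fun t => !(PySem.Str.startswith t "-"))
      ++ (PySem.List.slice rest (some ((i : Int) + 1)) none).filter
        (fun t => !(t == "--"))
  | none => rest.filter (fun t => !(PySem.Str.startswith t "-"))

-- ===== PRECONDITION & SPEC =====
def Spec_extract_rm_targets_py (tokens : List String) (out : List String) : Prop := out = extract_rm_targets_py_alt tokens
instance (tokens : List String) (out : List String) : Decidable (Spec_extract_rm_targets_py tokens out) := by unfold Spec_extract_rm_targets_py; infer_instance

-- ===== CLAIM (what is proved, stated in full; the proofs are below) =====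
def Claim_equal_extract_rm_targets_py : Prop := ∀ (tokens : List String), Dom_extract_rm_targets_py tokens → Spec_extract_rm_targets_py tokens (extract_rm_targets_py tokens)

-- ===== LEMMAS AND PROOFS =====

-- once past_flags is true, the loop appends every non-"--" token
theorem pvFoldA_true (l : List String) (acc : List String) :
    l.foldl pvStepA (acc, true)
      = (acc ++ l.filter (fun t => !(t == "--")), true) := by
  induction l generalizing acc with
  | nil => simp
  | cons t l ih =>
    by_cases ht : t = "--"
    · subst ht
      simp [List.foldl_cons, pvStepA, ih]
    · simp [List.foldl_cons, pvStepA, ht, ih]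

-- with past_flags false, the result is B's locate-and-slice decomposition
theorem pvFoldA_false (l : List String) (acc : List String) :
    (l.foldl pvStepA (acc, false)).1
      = acc ++ (match PySem.List.index? l "--" with
          | some i =>
              (l.take i).filter (fun t => !(PySem.Str.startswith t "-"))
              ++ (l.drop (i + 1)).filter (fun t => !(t == "--"))
          | none => l.filter (fun t => !(PySem.Str.startswith t "-"))) := by
  induction l generalizing acc with
  | nil => simp
  | cons t l ih =>
    by_cases ht : t = "--"
    · subst ht
      rw [List.foldl_cons, show pvStepA (acc, false) "--" = (acc, true) from rfl,
        pvFoldA_true, PySem.List.index?_cons_self]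
      simp
    · rw [List.foldl_cons, PySem.List.index?_cons_of_ne l ht]
      by_cases hs : PySem.Chars.startswith t.toList ['-'] = true
      · rw [show pvStepA (acc, false) t = (acc, false) from by
            simp [pvStepA, ht, hs], ih]
        cases PySem.List.index? l "--" with
        | none => simp [hs]
        | some i => simp [hs]
      · simp only [Bool.not_eq_true] at hs
        rw [show pvStepA (acc, false) t = (acc ++ [t], false) from by
            simp [pvStepA, ht, hs], ih]
        cases PySem.List.index? l "--" with
        | none => simp [hs]
        | some i => simp [hs]

-- ===== VERDICT (by name: the statement is the Claim_ definition above) =====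
theorem extract_rm_targets_py_spec : Claim_equal_extract_rm_targets_py := by
  intro tokens _
  unfold Spec_extract_rm_targets_py extract_rm_targets_py extract_rm_targets_py_alt
  rw [pvFoldA_false]
  simp only [List.nil_append]
  cases h : PySem.List.index? (PySem.List.slice tokens (some 1) none) "--" with
  | none => rfl
  | some i =>
    dsimp only
    rw [PySem.List.slice_to_natCast]
    rw [show ((i : Int) + 1) = (((i + 1 : Nat) : Int)) by push_cast; ring,
        PySem.List.slice_from_natCast]
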